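-- pv_equiv track=rewrite | github.com/mosquito/rmote | rmote/protocol.py | _split_exprs
-- ===== SOURCE A (Python) =====
-- def _split_exprs(line: str) -> list[tuple[bool, str]]:
--     """Split *line* into ``(is_expr, fragment)`` pairs.
--
--     Handles ``\\${`` escape (→ literal ``${``), bare ``$`` (literal),
--     and nested ``{}`` inside expressions via brace-depth counting.
--     """
--     result: list[tuple[bool, str]] = []
--     buf: list[str] = []
--     i = 0
--     n = len(line)
--     while i < n:
--         # \${ → literal ${
--         if line[i] == "\\" and line[i + 1 : i + 3] == "${":
--             buf.append("${")
--             i += 3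
--         # ${ → start of expression
--         elif line[i] == "$" and i + 1 < n and line[i + 1] == "{":
--             if buf:
--                 result.append((False, "".join(buf)))
--                 buf = []
--             i += 2  # consume '${'
--             depth = 1
--             expr: list[str] = []
--             while i < n and depth > 0:
--                 ch = line[i]
--                 if ch == "{":
--                     depth += 1
--                     expr.append(ch)
--                 elif ch == "}":
--                     depth -= 1
--                     if depth > 0:
--                         expr.append(ch)
--                 else:
--                     expr.append(ch)
--                 i += 1
--             result.append((True, "".join(expr)))
--         else:
--             buf.append(line[i])
--             i += 1
--     if buf:
--         result.append((False, "".join(buf)))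
--     return result
-- ===== SOURCE B (Python) =====
-- def _split_exprs(line: str) -> list[tuple[bool, str]]:
--     """Chunk-jumping re-implementation: locate "${" with str.find and copy
--     whole literal stretches by slicing; find the matching close brace by
--     hopping from "}" to "}" and counting "{" in the skipped slice."""
--     result: list[tuple[bool, str]] = []
--     lit = ""
--     i = 0
--     while True:
--         j = line.find("${", i)
--         if j == -1:
--             lit += line[i:]
--             if lit:
--                 result.append((False, lit))
--             return result
--         if j > i and line[j - 1] == "\\":
--             lit += line[i:j - 1] + "${"
--             i = j + 2
--             continue
--         lit += line[i:j]
--         if lit: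
--             result.append((False, lit))
--         lit = ""
--         pos = j + 2
--         depth = 1
--         k = line.find("}", pos)
--         while k != -1:
--             depth += line[pos:k].count("{") - 1
--             if depth == 0:
--                 break
--             pos = k + 1
--             k = line.find("}", pos)
--         if k == -1:
--             result.append((True, line[j + 2:]))
--             return result
--         result.append((True, line[j + 2:k]))
--         i = k + 1
-- ===== Notes on version B (the rewrite author's own statement) =====
-- stated objective: faster
-- what changed: Replaces A's per-character scan (outer loop with a nested depth loop) by chunk jumping: str.find locates the next "${" / "}" and whole stretches are copied by slicing, with nested braces handled by counting "{" in the skipped slice rather than examining each character.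
import Mathlib
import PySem

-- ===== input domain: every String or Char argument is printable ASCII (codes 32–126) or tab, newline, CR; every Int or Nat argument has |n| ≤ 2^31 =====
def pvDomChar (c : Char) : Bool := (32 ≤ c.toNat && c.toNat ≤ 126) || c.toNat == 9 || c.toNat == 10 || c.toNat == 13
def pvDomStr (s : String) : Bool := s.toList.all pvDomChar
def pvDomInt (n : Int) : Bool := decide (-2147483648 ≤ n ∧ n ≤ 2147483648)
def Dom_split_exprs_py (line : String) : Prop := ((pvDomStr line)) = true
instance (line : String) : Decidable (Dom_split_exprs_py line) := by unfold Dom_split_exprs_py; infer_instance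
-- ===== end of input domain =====

-- B replaces A's per-character scan by chunk jumping with str.find / slice / count;
-- measurably faster on literal-heavy input by a constant factor (C-level find vs Python char loop).

-- ===== PORT A =====
-- inner `while i < n and depth > 0` loop of A, over the suffix starting at i:
-- returns (expr, rest-of-line after the loop)
def pvAExpr : List Char → Int → List Char → List Char × List Char
  | [], _, expr => (expr, [])
  | c :: rest, depth, expr =>
    if depth ≤ 0 then (expr, c :: rest)
    else if c = '{' then pvAExpr rest (depth + 1) (expr ++ [c])
    else if c = '}' then
      if depth - 1 > 0 then pvAExpr rest (depth - 1) (expr ++ [c])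
      else pvAExpr rest (depth - 1) expr
    else pvAExpr rest depth (expr ++ [c])

-- needed by pvALoop's termination proof
theorem pvAExpr_snd_le : ∀ (s : List Char) (d : Int) (e : List Char),
    (pvAExpr s d e).2.length ≤ s.length
  | [], _, _ => by simp [pvAExpr]
  | c :: rest, d, e => by
    unfold pvAExpr
    split_ifs <;>
      simp <;>
      exact le_trans (pvAExpr_snd_le rest _ _) (Nat.le_succ _)

-- outer `while i < n` loop of A, over the suffix starting at i
def pvALoop (s : List Char) (buf : List Char) (result : List (Bool × String)) :
    List (Bool × String) :=
  match s with
  | [] => if buf = [] then result else result ++ [(false, String.ofList buf)]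
  | c :: rest =>
    -- line[i] == "\\" and line[i+1:i+3] == "${"   (the slice clamps, as take does)
    if c = '\\' ∧ rest.take 2 = ['$', '{'] then
      pvALoop (rest.drop 2) (buf ++ ['$', '{']) result          -- i += 3
    -- line[i] == "$" and i+1 < n and line[i+1] == "{"
    else if c = '$' ∧ rest.take 1 = ['{'] then
      let result' := if buf = [] then result else result ++ [(false, String.ofList buf)]
      let p := pvAExpr (rest.drop 1) 1 []                        -- i += 2; inner loop
      pvALoop p.2 [] (result' ++ [(true, String.ofList p.1)])
    else
      pvALoop rest (buf ++ [c]) result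
  termination_by s.length
  decreasing_by
  all_goals (try simp)
  all_goals first
    | omega
    | (have h1 := pvAExpr_snd_le rest.tail 1 []
       have h2 : rest.tail.length ≤ rest.length := (List.tail_sublist rest).length_le
       omega)

def split_exprs_py (line : String) : List (Bool × String) :=
  pvALoop line.toList [] []

-- ===== PORT B =====
-- inner `while k != -1` loop of Source B: hop from "}" to "}" counting "{" in between.
-- fuel only makes the recursion structural; (length+1) is always enough (proved below).
def pvBClose (s : List Char) (pos : Int) (depth : Int) (k : Int) : Nat → Int
  | 0 => k
  | fuel + 1 =>
    if k = -1 then -1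
    else
      let depth' := depth + (PySem.Chars.count (PySem.List.slice s (some pos) (some k)) ['{'] : Int) - 1
      if depth' = 0 then k
      else pvBClose s (k + 1) depth' (PySem.Chars.findFrom s ['}'] (k + 1) none) fuel

-- outer `while True` loop of Source B
def pvBLoop (s : List Char) (i : Int) (lit : List Char) (result : List (Bool × String)) :
    Nat → List (Bool × String)
  | 0 => result
  | fuel + 1 =>
    let j := PySem.Chars.findFrom s ['$', '{'] i none
    if j = -1 then
      let lit' := lit ++ PySem.List.slice s (some i) none
      if lit' = [] then result else result ++ [(false, String.ofList lit')]
    else if i < j ∧ PySem.Chars.pyGet? s (j - 1) = some '\\' then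
      pvBLoop s (j + 2) (lit ++ PySem.List.slice s (some i) (some (j - 1)) ++ ['$', '{']) result fuel
    else
      let lit' := lit ++ PySem.List.slice s (some i) (some j)
      let result' := if lit' = [] then result else result ++ [(false, String.ofList lit')]
      let k := pvBClose s (j + 2) 1 (PySem.Chars.findFrom s ['}'] (j + 2) none) fuel
      if k = -1 then
        result' ++ [(true, String.ofList (PySem.List.slice s (some (j + 2)) none))]
      else
        pvBLoop s (k + 1) [] (result' ++ [(true, String.ofList (PySem.List.slice s (some (j + 2)) (some k)))]) fuel

def split_exprs_py_alt (line : String) : List (Bool × String) :=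
  pvBLoop line.toList 0 [] [] (line.toList.length + 1)

-- ===== PRECONDITION & SPEC =====
def Spec_split_exprs_py (line : String) (out : List (Bool × String)) : Prop := out = split_exprs_py_alt line
instance (line : String) (out : List (Bool × String)) : Decidable (Spec_split_exprs_py line out) := by unfold Spec_split_exprs_py; infer_instance

-- ===== CLAIM (what is proved, stated in full; the proofs are below) =====
def Claim_equal_split_exprs_py : Prop := ∀ (line : String), Dom_split_exprs_py line → Spec_split_exprs_py line (split_exprs_py line)

-- ===== LEMMAS AND PROOFS =====

-- str.count with a single-character needle is List.count
theorem pvCount_go_singleton (c : Char) : ∀ (fuel : Nat) (s : List Char) (acc : Nat),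
    s.length ≤ fuel → PySem.Chars.count.go [c] fuel s acc = acc + s.count c
  | 0, s, acc, h => by
      have : s = [] := List.length_eq_zero_iff.mp (Nat.le_zero.mp h)
      subst this; simp [PySem.Chars.count.go]
  | fuel + 1, [], acc, h => by simp [PySem.Chars.count.go]
  | fuel + 1, a :: t, acc, h => by
      rw [PySem.Chars.count.go]
      by_cases hc : a = c
      · simp [List.isPrefixOf, hc,
          pvCount_go_singleton c fuel t (acc + 1) (by simpa using h)]
        omega
      · simp [List.isPrefixOf, Ne.symm hc, hc,
          pvCount_go_singleton c fuel t acc (by simpa using h)]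

theorem pvCount_singleton (s : List Char) (c : Char) : PySem.Chars.count s [c] = s.count c := by
  simp [PySem.Chars.count]
  rw [pvCount_go_singleton c s.length s 0 le_rfl]
  omega

-- prefix facts used to decide A's branch conditions
theorem pvPrefix_of_take2 {rest : List Char} (ht : rest.take 2 = ['$', '{']) :
    ['$', '{'] <+: rest := by
  rw [List.prefix_iff_eq_take]; exact ht.symm

theorem pvPrefix_of_take1 {c : Char} {rest : List Char} (hc : c = '$')
    (ht : rest.take 1 = ['{']) : ['$', '{'] <+: c :: rest := by
  cases rest with
  | nil => simp at ht
  | cons d r =>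
    simp at ht
    simp [List.cons_prefix_iff, hc, ht]

-- A with depth already 0 returns immediately
theorem pvAExpr_done (u : List Char) (d : Int) (e : List Char) (h : d ≤ 0) :
    pvAExpr u d e = (e, u) := by
  cases u <;> simp [pvAExpr, h]

-- A's inner loop walks a '}'-free prefix appending it all, adding count '{' to depth
theorem pvAExpr_free : ∀ (w v : List Char) (d : Int) (e : List Char), '}' ∉ w → 1 ≤ d →
    pvAExpr (w ++ v) d e = pvAExpr v (d + w.count '{') (e ++ w)
  | [], v, d, e, h, hd => by simp
  | c :: w', v, d, e, h, hd => by
    have hc : c ≠ '}' := fun x => h (by simp [x])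
    have hw : '}' ∉ w' := fun x => h (by simp [x])
    rw [List.cons_append, pvAExpr]
    have hd0 : ¬ d ≤ 0 := by omega
    by_cases hb : c = '{'
    · simp only [hd0, if_false, hb, if_true]
      rw [pvAExpr_free w' v (d + 1) (e ++ ['{']) hw (by omega)]
      simp
      ring_nf
    · simp only [hd0, if_false, hb, hc, if_false]
      rw [pvAExpr_free w' v d (e ++ [c]) hw hd]
      simp [hb]

-- A's outer loop with no "${" anywhere: everything is literal
theorem pvALoop_noExpr : ∀ (t buf : List Char) (res : List (Bool × String)),
    (∀ j, ¬ ['$', '{'] <+: t.drop j) →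
    pvALoop t buf res =
      (if buf ++ t = [] then res else res ++ [(false, String.ofList (buf ++ t))])
  | [], buf, res, h => by simp [pvALoop]
  | c :: rest, buf, res, h => by
    rw [pvALoop]
    have h1 : ¬ (c = '\\' ∧ rest.take 2 = ['$', '{']) := by
      rintro ⟨-, ht⟩
      exact h 1 (by simpa [List.prefix_iff_eq_take] using ht.symm)
    have h2 : ¬ (c = '$' ∧ rest.take 1 = ['{']) := by
      rintro ⟨hc, ht⟩
      apply h 0
      cases rest with
      | nil => simp at ht
      | cons d rest' =>
        simp at ht
        simp [List.cons_prefix_iff, hc, ht]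
    simp only [h1, if_false, h2]
    rw [pvALoop_noExpr rest (buf ++ [c]) res (fun j => by simpa using h (j + 1))]
    simp

-- A's outer loop walks to an escaped "${" at m+1 (backslash at m)
theorem pvALoop_escape : ∀ (m : Nat) (t buf : List Char) (res : List (Bool × String)),
    ['$', '{'] <+: t.drop (m + 1) → (∀ p < m + 1, ¬ ['$', '{'] <+: t.drop p) →
    t[m]? = some '\\' →
    pvALoop t buf res = pvALoop (t.drop (m + 3)) (buf ++ t.take m ++ ['$', '{']) res
  | 0, t, buf, res, hocc, hmin, hbs => by
    cases t with
    | nil => simp at hbs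
    | cons c rest =>
      simp at hbs
      simp only [List.drop_succ_cons, List.drop_zero] at hocc
      have ht2 : rest.take 2 = ['$', '{'] := by
        rw [List.prefix_iff_eq_take] at hocc; exact hocc.symm
      rw [pvALoop]
      simp [hbs, ht2]
  | m + 1, t, buf, res, hocc, hmin, hbs => by
    cases t with
    | nil => simp at hbs
    | cons c rest =>
      rw [pvALoop]
      have h1 : ¬ (c = '\\' ∧ rest.take 2 = ['$', '{']) := by
        rintro ⟨-, ht⟩
        exact hmin 1 (by omega) (pvPrefix_of_take2 ht)
      have h2 : ¬ (c = '$' ∧ rest.take 1 = ['{']) := by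
        rintro ⟨hc, ht⟩
        exact hmin 0 (by omega) (pvPrefix_of_take1 hc ht)
      simp only [h1, if_false, h2]
      rw [pvALoop_escape m rest (buf ++ [c]) res (by simpa using hocc)
        (fun p hp => by simpa using hmin (p + 1) (by omega)) (by simpa using hbs)]
      simp

-- A's outer loop walks to an unescaped "${" at m and enters the expression loop
theorem pvALoop_expr : ∀ (m : Nat) (t buf : List Char) (res : List (Bool × String)),
    ['$', '{'] <+: t.drop m → (∀ p < m, ¬ ['$', '{'] <+: t.drop p) →
    (m = 0 ∨ t[m - 1]? ≠ some '\\') →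
    pvALoop t buf res =
      (let res' := if buf ++ t.take m = [] then res
                   else res ++ [(false, String.ofList (buf ++ t.take m))]
       let p := pvAExpr (t.drop (m + 2)) 1 []
       pvALoop p.2 [] (res' ++ [(true, String.ofList p.1)]))
  | 0, t, buf, res, hocc, hmin, hnb => by
    simp only [List.drop_zero] at hocc
    cases t with
    | nil => simp at hocc
    | cons c rest =>
      cases rest with
      | nil => simp [List.cons_prefix_iff] at hocc
      | cons d u =>
        simp [List.cons_prefix_iff] at hocc
        obtain ⟨hc, hd⟩ := hocc
        subst hc; subst hd
        rw [pvALoop]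
        simp
  | m + 1, t, buf, res, hocc, hmin, hnb => by
    cases t with
    | nil => simp at hocc
    | cons c rest =>
      rw [pvALoop]
      have h2 : ¬ (c = '$' ∧ rest.take 1 = ['{']) := by
        rintro ⟨hc, ht⟩
        exact hmin 0 (by omega) (pvPrefix_of_take1 hc ht)
      have h1 : ¬ (c = '\\' ∧ rest.take 2 = ['$', '{']) := by
        rintro ⟨hc, ht⟩
        rcases Nat.eq_zero_or_pos m with hm | hm
        · subst hm
          rcases hnb with h | h
          · omega
          · simp at h; exact h hc
        · exact hmin 1 (by omega) (pvPrefix_of_take2 ht)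
      simp only [h1, if_false, h2]
      rw [pvALoop_expr m rest (buf ++ [c]) res (by simpa using hocc)
        (fun p hp => by simpa using hmin (p + 1) (by omega))
        (by rcases hnb with h | h
            · omega
            · cases m with
              | zero => left; rfl
              | succ k => right; simpa using h)]
      simp

theorem pvSingleton_prefix_iff (u : List Char) (c : Char) : [c] <+: u ↔ u[0]? = some c := by
  cases u <;> simp [List.cons_prefix_iff]

theorem pvNotMem_take (u : List Char) (m : Nat) (c : Char)
    (h : ∀ p < m, ¬ [c] <+: u.drop p) : c ∉ u.take m := by
  intro hmem
  rw [List.mem_iff_getElem] at hmem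
  obtain ⟨i, hlen, hi⟩ := hmem
  have hlt : i < m := by simp at hlen; omega
  apply h i hlt
  rw [pvSingleton_prefix_iff]
  rw [List.getElem?_drop]
  simp only [Nat.add_zero]
  have hiu : i < u.length := by simp at hlen; omega
  rw [List.getElem?_eq_getElem hiu]
  rw [List.getElem_take] at hi
  simp [hi]

-- B's close-brace hunt computes exactly what A's inner loop consumes
theorem pvBClose_aExpr (s : List Char) : ∀ (fuel pos : Nat) (d : Int),
    pos ≤ s.length → 1 ≤ d → s.length - pos < fuel →
    (pvBClose s pos d (PySem.Chars.findFrom s ['}'] (pos : Int) none) fuel = -1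
      ∧ ∀ acc, pvAExpr (s.drop pos) d acc = (acc ++ s.drop pos, []))
    ∨ (∃ k : Nat, pvBClose s pos d (PySem.Chars.findFrom s ['}'] (pos : Int) none) fuel = (k : Int)
      ∧ pos ≤ k ∧ k < s.length
      ∧ ∀ acc, pvAExpr (s.drop pos) d acc =
          (acc ++ (s.drop pos).take (k - pos), s.drop (k + 1))) := by
  intro fuel
  induction fuel with
  | zero => intro pos d h1 h2 h3; omega
  | succ f ih =>
    intro pos d hpos hd hf
    rw [PySem.Chars.findFrom_natCast s ['}'] pos hpos]
    by_cases hFneg : PySem.Chars.find (s.drop pos) ['}'] = -1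
    · left
      refine ⟨by rw [hFneg]; simp [pvBClose], fun acc => ?_⟩
      have hnomem : '}' ∉ s.drop pos := by
        intro hmem
        exact (PySem.Chars.find_eq_neg_one_iff _ _).mp hFneg
          ((List.singleton_infix_iff _ _).mpr hmem)
      have hfree := pvAExpr_free (s.drop pos) [] d acc hnomem hd
      simp only [List.append_nil] at hfree
      rw [hfree, pvAExpr]
    · have hF0 : 0 ≤ PySem.Chars.find (s.drop pos) ['}'] := by
        have := PySem.Chars.neg_one_le_find (s.drop pos) ['}']
        omega
      obtain ⟨hpre, hmin⟩ := PySem.Chars.find_spec (s := s.drop pos) (sub := ['}']) hF0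
      set m := (PySem.Chars.find (s.drop pos) ['}']).toNat with hm
      have hmlt : m < s.length - pos := by
        have h1 := hpre.length_le
        simp [List.length_drop] at h1
        omega
      have hcast : (PySem.Chars.find (s.drop pos) ['}']) = (m : Int) := by omega
      clear_value m
      have hsk0 : s.drop (pos + m) = '}' :: s.drop (pos + m + 1) := by
        have hk0 : pos + m < s.length := by omega
        have hpre' : s[pos + m]? = some '}' := by
          rw [pvSingleton_prefix_iff] at hpre
          simpa [List.getElem?_drop] using hpre
        rw [List.getElem?_eq_getElem hk0] at hpre'
        simp at hpre'
        rw [List.drop_eq_getElem_cons hk0, hpre']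
      rw [if_neg hFneg, hcast]
      have hcast2 : ((pos : Int) + (m : Int)) = ((pos + m : Nat) : Int) := by push_cast; ring
      rw [hcast2, pvBClose]
      have hk0ne : ¬ (((pos + m : Nat) : Int) = -1) := by omega
      rw [if_neg hk0ne]
      have hslice : PySem.List.slice s (some (pos : Int)) (some ((pos + m : Nat) : Int)) =
          (s.drop pos).take m := by
        rw [PySem.List.slice_natCast s pos (pos + m)]
        congr 1
        omega
      rw [hslice, pvCount_singleton]
      set cnt : Nat := ((s.drop pos).take m).count '{' with hcnt
      clear_value cnt
      have hfreeTake : '}' ∉ (s.drop pos).take m := by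
        apply pvNotMem_take
        intro p hp hpref
        exact hmin p hp hpref
      have haStep : ∀ acc, pvAExpr (s.drop pos) d acc =
          pvAExpr ('}' :: s.drop (pos + m + 1)) (d + (cnt : Int)) (acc ++ (s.drop pos).take m) := by
        intro acc
        conv_lhs => rw [← List.take_append_drop m (s.drop pos)]
        rw [pvAExpr_free _ _ d acc hfreeTake hd]
        rw [List.drop_drop, hsk0, hcnt]
      have hstep2 : ∀ (v : List Char) (e : List Char),
          pvAExpr ('}' :: v) (d + (cnt : Int)) e =
            (if d + (cnt : Int) - 1 > 0 then pvAExpr v (d + (cnt : Int) - 1) (e ++ ['}'])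
             else pvAExpr v (d + (cnt : Int) - 1) e) := by
        intro v e
        rw [pvAExpr, if_neg (by omega), if_neg (by decide), if_pos rfl]
      by_cases hD : d + (cnt : Int) - 1 = 0
      · rw [if_pos (by omega)]
        right
        refine ⟨pos + m, rfl, by omega, by omega, fun acc => ?_⟩
        rw [haStep, hstep2, if_neg (by omega), pvAExpr_done _ _ _ (by omega)]
        have hmm : pos + m - pos = m := by omega
        rw [hmm]
      · rw [if_neg (by omega)]
        have hD1 : 1 ≤ d + (cnt : Int) - 1 := by
          have : (0 : Int) ≤ (cnt : Int) := by positivity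
          omega
        have hcast3 : ((pos + m : Nat) : Int) + 1 = ((pos + m + 1 : Nat) : Int) := by push_cast; ring
        rw [hcast3]
        have hrec := ih (pos + m + 1) (d + (cnt : Int) - 1) (by omega) hD1 (by omega)
        have hsplit : s.drop pos = (s.drop pos).take m ++ '}' :: s.drop (pos + m + 1) := by
          conv_lhs => rw [← List.take_append_drop m (s.drop pos)]
          rw [List.drop_drop, hsk0]
        have hlenTake : ((s.drop pos).take m).length = m := by
          simp [List.length_take]
          omega
        rcases hrec with ⟨hb, ha⟩ | ⟨k, hbk, hk1, hk2, ha⟩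
        · left
          refine ⟨hb, fun acc => ?_⟩
          rw [haStep, hstep2, if_pos (by omega), ha]
          conv_rhs => rw [hsplit]
          simp
        · right
          refine ⟨k, hbk, by omega, hk2, fun acc => ?_⟩
          rw [haStep, hstep2, if_pos (by omega), ha]
          have h1 : List.take (k - pos) (List.drop pos s)
              = List.take m (List.drop pos s)
                ++ '}' :: List.take (k - (pos + m + 1)) (List.drop (pos + m + 1) s) := by
            conv_lhs => rw [hsplit]
            rw [List.take_append, hlenTake,
              List.take_of_length_le (by rw [hlenTake]; omega)]
            have h2 : k - pos - m = (k - (pos + m + 1)) + 1 := by omega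
            rw [h2]
            simp
          rw [h1]
          simp

-- main correspondence: B's chunk-jumping loop equals A's char-by-char loop
theorem pvBLoop_aLoop (s : List Char) : ∀ (fuel i : Nat) (lit : List Char)
    (res : List (Bool × String)), i ≤ s.length → s.length - i < fuel →
    pvBLoop s (i : Int) lit res fuel = pvALoop (s.drop i) lit res := by
  intro fuel
  induction fuel with
  | zero => intro i lit res h1 h2; omega
  | succ f ih =>
    intro i lit res hi hf
    simp only [pvBLoop]
    rw [PySem.Chars.findFrom_natCast s ['$', '{'] i hi]
    by_cases hFneg : PySem.Chars.find (s.drop i) ['$', '{'] = -1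
    · rw [if_pos (by rw [if_pos hFneg])]
      rw [PySem.List.slice_from_natCast]
      rw [pvALoop_noExpr (s.drop i) lit res (fun j hj => by
        apply (PySem.Chars.find_eq_neg_one_iff _ _).mp hFneg
        rw [← PySem.Chars.isIn_iff_infix, ← PySem.Chars.exists_prefix_drop_iff_isIn]
        exact ⟨j, hj⟩)]
    · have hF0 : 0 ≤ PySem.Chars.find (s.drop i) ['$', '{'] := by
        have := PySem.Chars.neg_one_le_find (s.drop i) ['$', '{']
        omega
      obtain ⟨hocc, hmin⟩ := PySem.Chars.find_spec (s := s.drop i) (sub := ['$', '{']) hF0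
      set m := (PySem.Chars.find (s.drop i) ['$', '{']).toNat with hm
      have hcast : PySem.Chars.find (s.drop i) ['$', '{'] = (m : Int) := by omega
      clear_value m
      have hmlen : i + m + 2 ≤ s.length := by
        have h1 := hocc.length_le
        simp [List.length_drop] at h1
        omega
      rw [if_neg (by rw [if_neg hFneg]; omega)]
      rw [if_neg hFneg, hcast]
      have hcast2 : ((i : Int) + (m : Int)) = ((i + m : Nat) : Int) := by push_cast; ring
      rw [hcast2]
      by_cases hC : m ≠ 0 ∧ (s.drop i)[m - 1]? = some '\\'
      · -- escaped "${": backslash just before the match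
        obtain ⟨hm0, hbs⟩ := hC
        have hget : PySem.Chars.pyGet? s (((i + m : Nat) : Int) - 1) = some '\\' := by
          have hcast3 : (((i + m : Nat) : Int) - 1) = ((i + m - 1 : Nat) : Int) := by
            push_cast [Nat.cast_sub (by omega : 1 ≤ i + m)]
            ring
          rw [hcast3, PySem.Chars.pyGet?_eq_listPyGet?, PySem.List.pyGet?_natCast]
          rw [List.getElem?_drop] at hbs
          rw [show i + m - 1 = i + (m - 1) by omega]
          exact hbs
        rw [if_pos ⟨by omega, hget⟩]
        have hcast4 : (((i + m : Nat) : Int) - 1) = ((i + m - 1 : Nat) : Int) := by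
          push_cast [Nat.cast_sub (by omega : 1 ≤ i + m)]
          ring
        rw [hcast4, PySem.List.slice_natCast]
        rw [show i + m - 1 - i = m - 1 by omega]
        have hcast5 : ((i + m : Nat) : Int) + 2 = ((i + m + 2 : Nat) : Int) := by push_cast; ring
        rw [hcast5]
        rw [ih (i + m + 2) _ _ hmlen (by omega)]
        rw [pvALoop_escape (m - 1) (s.drop i) lit res
          (by rw [show m - 1 + 1 = m by omega]; exact hocc)
          (by rw [show m - 1 + 1 = m by omega]; exact hmin)
          hbs]
        rw [List.drop_drop, show i + (m - 1 + 3) = i + m + 2 by omega]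
      · -- expression start at the match
        have hnb : m = 0 ∨ ¬ ((s.drop i)[m - 1]? = some '\\') := by tauto
        have hCfalse : ¬ ((i : Int) < ((i + m : Nat) : Int)
            ∧ PySem.Chars.pyGet? s (((i + m : Nat) : Int) - 1) = some '\\') := by
          rintro ⟨hlt, hget⟩
          have hm0 : m ≠ 0 := by omega
          apply hC
          refine ⟨hm0, ?_⟩
          have hcast3 : (((i + m : Nat) : Int) - 1) = ((i + m - 1 : Nat) : Int) := by
            push_cast [Nat.cast_sub (by omega : 1 ≤ i + m)]
            ring
          rw [hcast3, PySem.Chars.pyGet?_eq_listPyGet?, PySem.List.pyGet?_natCast] at hget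
          rw [List.getElem?_drop]
          rw [show i + (m - 1) = i + m - 1 by omega]
          exact hget
        rw [if_neg hCfalse]
        rw [PySem.List.slice_natCast]
        rw [show i + m - i = m by omega]
        have hcast5 : ((i + m : Nat) : Int) + 2 = ((i + m + 2 : Nat) : Int) := by push_cast; ring
        rw [hcast5]
        rw [pvALoop_expr m (s.drop i) lit res hocc hmin hnb]
        have hdrop2 : (s.drop i).drop (m + 2) = s.drop (i + m + 2) := by
          rw [List.drop_drop, show i + (m + 2) = i + m + 2 by omega]
        rcases pvBClose_aExpr s f (i + m + 2) 1 hmlen le_rfl (by omega)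
          with ⟨hb, ha⟩ | ⟨k, hbk, hk1, hk2, ha⟩
        · rw [hb, if_pos rfl]
          rw [hdrop2, ha []]
          rw [PySem.List.slice_from_natCast]
          simp [pvALoop]
        · rw [hbk, if_neg (by omega)]
          have hcast6 : ((k : Nat) : Int) + 1 = ((k + 1 : Nat) : Int) := by push_cast; ring
          rw [hcast6]
          rw [ih (k + 1) _ _ (by omega) (by omega)]
          rw [hdrop2, ha []]
          rw [PySem.List.slice_natCast]
          simp

-- ===== VERDICT (by name: the statement is the Claim_ definition above) =====
theorem split_exprs_py_spec : Claim_equal_split_exprs_py := by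
  intro line _
  unfold Spec_split_exprs_py split_exprs_py split_exprs_py_alt
  have h := pvBLoop_aLoop line.toList (line.toList.length + 1) 0 [] [] (Nat.zero_le _) (by omega)
  simp only [Nat.cast_zero, List.drop_zero] at h
  exact h.symm
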